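-- pv_equiv track=rewrite | github.com/salah55s/Cipher | streamlit_app.py | render_byte_array
-- ===== SOURCE A (Python) =====
-- def render_byte_array(data, title="Byte Array"):
--     """Render byte array as colored blocks."""
--     cols_per_row = 16
--     rows = [data[i:i+cols_per_row] for i in range(0, len(data), cols_per_row)]
--
--     html = f"<h4>{title}</h4><div>"
--     for row in rows:
--         html += "<div style='margin: 5px 0;'>"
--         for byte in row:
--             color = f"hsl({(byte * 360 // 256)}, 70%, 50%)"
--             html += f'<span class="matrix-cell" style="background-color: {color};">{byte:02x}</span>'
--         html += "</div>"
--     html += "</div>"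
--
--     return html
-- ===== SOURCE B (Python) =====
-- def render_byte_array(data, title="Byte Array"):
--     """Render byte array as colored blocks (single enumerated pass, parts list + join)."""
--     parts = [f"<h4>{title}</h4><div>"]
--     last = len(data) - 1
--     for i, byte in enumerate(data):
--         if i % 16 == 0:
--             parts.append("<div style='margin: 5px 0;'>")
--         color = f"hsl({byte * 360 // 256}, 70%, 50%)"
--         parts.append(f'<span class="matrix-cell" style="background-color: {color};">{byte:02x}</span>')
--         if i % 16 == 15 or i == last:
--             parts.append("</div>")
--     parts.append("</div>")
--     return "".join(parts)
-- ===== Notes on version B (the rewrite author's own statement) =====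
-- stated objective: alternative
-- what changed: Replaces A's materialised 16-element row chunking (slice list comprehension + nested loops concatenating one string) with a single enumerated pass that opens/closes each row div by index arithmetic (i % 16, last index), collecting fragments in a parts list joined once.
import Mathlib
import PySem

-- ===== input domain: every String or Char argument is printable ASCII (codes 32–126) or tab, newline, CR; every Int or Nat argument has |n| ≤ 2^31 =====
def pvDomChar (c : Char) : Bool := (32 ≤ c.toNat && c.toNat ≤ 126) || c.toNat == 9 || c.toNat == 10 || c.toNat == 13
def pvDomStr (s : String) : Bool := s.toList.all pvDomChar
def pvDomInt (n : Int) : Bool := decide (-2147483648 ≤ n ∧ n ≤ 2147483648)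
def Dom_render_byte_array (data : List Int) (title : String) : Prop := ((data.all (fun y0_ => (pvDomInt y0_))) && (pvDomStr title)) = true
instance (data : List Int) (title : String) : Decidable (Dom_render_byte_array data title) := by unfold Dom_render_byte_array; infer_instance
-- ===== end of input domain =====

-- B replaces A's row-chunking list and nested loops with one enumerated pass that opens/closes
-- the row div by index arithmetic, collecting parts joined once (objective: alternative decomposition).

-- Shared formatting helpers: both Pythons build these exact f-string fragments.
-- Lower-case hex digits of a Nat (hand-written: Python's {:x} digits; exact for every Nat).
def pvHexDigit (d : Nat) : Char :=
  (['0','1','2','3','4','5','6','7','8','9','a','b','c','d','e','f']).getD d '0'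

def pvHexNat (n : Nat) : List Char :=
  if n < 16 then [pvHexDigit n] else pvHexNat (n / 16) ++ [pvHexDigit (n % 16)]
termination_by n
decreasing_by omega

-- f"{n:02x}" : sign, lower-case hex digits of |n|, zero-padded to width 2 (pad goes after the sign)
def pvHex02 (n : Int) : List Char :=
  PySem.Chars.zfill (if n < 0 then '-' :: pvHexNat n.natAbs else pvHexNat n.toNat) 2

-- f'<span class="matrix-cell" style="background-color: hsl({byte*360//256}, 70%, 50%);">{byte:02x}</span>'
def pvSpan (b : Int) : List Char :=
  "<span class=\"matrix-cell\" style=\"background-color: hsl(".toList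
    ++ PySem.Int.toChars (PySem.Int.floordiv (b * 360) 256)
    ++ ", 70%, 50%);\">".toList ++ pvHex02 b ++ "</span>".toList

def pvRowOpen : List Char := "<div style='margin: 5px 0;'>".toList
def pvClose : List Char := "</div>".toList
def pvHeader (title : String) : List Char := "<h4>".toList ++ title.toList ++ "</h4><div>".toList

-- ===== PORT A =====
def render_byte_array (data : List Int) (title : String) : String :=
  let rows := (PySem.List.pyRange 0 (data.length : Int) 16).map
                (fun i => PySem.List.slice data (some i) (some (i + 16)))
  let html := pvHeader title
  let html := rows.foldl
    (fun h row => (row.foldl (fun h2 b => h2 ++ pvSpan b) (h ++ pvRowOpen)) ++ pvClose) html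
  String.mk (html ++ pvClose)

-- ===== PORT B =====
-- loop body of B: maybe open a row, append the span, maybe close the row
def pvStepB (last : Int) (ps : List (List Char)) (ib : Int × Int) : List (List Char) :=
  let ps := if PySem.Int.mod ib.1 16 == 0 then ps ++ [pvRowOpen] else ps
  let ps := ps ++ [pvSpan ib.2]
  if (PySem.Int.mod ib.1 16 == 15) || (ib.1 == last) then ps ++ [pvClose] else ps

def render_byte_array_alt (data : List Int) (title : String) : String :=
  let last : Int := (data.length : Int) - 1
  let parts : List (List Char) := [pvHeader title]
  let parts := (PySem.List.enumerate data).foldl (pvStepB last) parts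
  String.mk (parts ++ [pvClose]).flatten

-- ===== PRECONDITION & SPEC =====
def Spec_render_byte_array (data : List Int) (title : String) (out : String) : Prop := out = render_byte_array_alt data title
instance (data : List Int) (title : String) (out : String) : Decidable (Spec_render_byte_array data title out) := by unfold Spec_render_byte_array; infer_instance

-- ===== CLAIM (what is proved, stated in full; the proofs are below) =====
def Claim_equal_render_byte_array : Prop := ∀ (data : List Int) (title : String), Dom_render_byte_array data title → Spec_render_byte_array data title (render_byte_array data title)

-- ===== LEMMAS AND PROOFS =====

-- the 16-element chunks A materialises as `rows`
def pvChunks (data : List Int) : List (List Int) :=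
  if data = [] then [] else data.take 16 :: pvChunks (data.drop 16)
termination_by data.length
decreasing_by simp [List.length_drop]; cases data <;> simp_all

def pvRowC (row : List Int) : List Char := pvRowOpen ++ (row.map pvSpan).flatten ++ pvClose
def pvRowP (row : List Int) : List (List Char) := pvRowOpen :: row.map pvSpan ++ [pvClose]

theorem pv_a_outer (rows : List (List Int)) (init : List Char) :
    rows.foldl (fun h row => (row.foldl (fun h2 b => h2 ++ pvSpan b) (h ++ pvRowOpen)) ++ pvClose) init
      = init ++ (rows.map pvRowC).flatten := by
  induction rows generalizing init with
  | nil => simp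
  | cons r rs ih =>
      rw [List.foldl_cons, ih, PySem.List.foldl_append_eq_flatMap]
      simp [pvRowC, List.flatMap_def, List.append_assoc]

theorem pv_range_chunks (m : Nat) (data : List Int) (hm : m = (data.length + 15) / 16) :
    (List.range m).map (fun k => (data.drop (16 * k)).take 16) = pvChunks data := by
  induction m generalizing data with
  | zero =>
      have hz : data.length = 0 := by omega
      have hd : data = [] := List.eq_nil_of_length_eq_zero hz
      subst hd; simp [pvChunks]
  | succ m ih =>
      have hne : data ≠ [] := by
        intro h; subst h; simp only [List.length_nil] at hm; omega
      have hpos : 1 ≤ data.length := by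
        cases data with
        | nil => exact absurd rfl hne
        | cons a l => simp
      rw [pvChunks]; simp only [hne, if_false]
      rw [List.range_succ_eq_map, List.map_cons, List.map_map]
      congr 1
      rw [← ih (data.drop 16) (by rw [List.length_drop]; omega)]
      apply List.map_congr_left
      intro k _
      show List.take 16 (List.drop (16 * Nat.succ k) data)
            = List.take 16 (List.drop (16 * k) (List.drop 16 data))
      rw [List.drop_drop]
      congr 2
      omega

theorem pv_rows_eq (data : List Int) :
    (PySem.List.pyRange 0 (data.length : Int) 16).map
        (fun i => PySem.List.slice data (some i) (some (i + 16)))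
      = pvChunks data := by
  rw [PySem.List.pyRange_of_pos 0 (data.length : Int) (by norm_num)]
  rw [← pv_range_chunks ((data.length + 15) / 16) data rfl]
  have hlen : (if (0:Int) < (data.length : Int)
      then (((data.length : Int) - 0 + 16 - 1) / 16).toNat else 0) = (data.length + 15) / 16 := by
    split_ifs with h
    · omega
    · have : data.length = 0 := by omega
      omega
  rw [hlen, List.map_map]
  apply List.map_congr_left
  intro k _
  have : (0 : Int) + 16 * (k : Int) = ((16 * k : Nat) : Int) := by push_cast; ring
  simp only [Function.comp, this]
  have h2 : ((16 * k : Nat) : Int) + 16 = ((16 * k : Nat) : Int) + ((16 : Nat) : Int) := by norm_num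
  rw [h2, PySem.List.slice_natCast_add]

theorem pv_a_closed (data : List Int) (title : String) :
    render_byte_array data title
      = String.mk (pvHeader title ++ ((pvChunks data).map pvRowC).flatten ++ pvClose) := by
  simp only [render_byte_array]
  rw [pv_rows_eq, pv_a_outer]

-- one chunk of B's pass: opens iff the index is ≡ 0 (mod 16), closes exactly at its last element
theorem pv_b_chunk (L : Nat) (c : List Int) (k : Nat) (acc : List (List Char))
    (hne : c ≠ []) (h16 : k % 16 + c.length ≤ 16) (hL : k + c.length ≤ L)
    (hend : k % 16 + c.length = 16 ∨ k + c.length = L) :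
    (PySem.List.enumerate c (k : Int)).foldl (pvStepB ((L : Int) - 1)) acc
      = acc ++ (if k % 16 = 0 then [pvRowOpen] else []) ++ c.map pvSpan ++ [pvClose] := by
  induction c generalizing k acc with
  | nil => exact absurd rfl hne
  | cons b c' ih =>
      rw [PySem.List.enumerate_cons, List.foldl_cons]
      have hstep : pvStepB ((L : Int) - 1) acc ((k : Int), b)
          = (acc ++ (if k % 16 = 0 then [pvRowOpen] else []) ++ [pvSpan b])
            ++ (if k % 16 = 15 ∨ k + 1 = L then [pvClose] else []) := by
        have hmod : PySem.Int.mod (k : Int) 16 = ((k % 16 : Nat) : Int) := by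
          exact_mod_cast PySem.Int.mod_natCast k 16
        have h0i : (((k % 16 : Nat) : Int) = 0) ↔ k % 16 = 0 := by omega
        have h15i : (((k % 16 : Nat) : Int) = 15) ↔ k % 16 = 15 := by omega
        have hli : ((k : Int) = (L : Int) - 1) ↔ k + 1 = L := by omega
        simp only [pvStepB, hmod, beq_iff_eq, Bool.or_eq_true,
          h0i, h15i, hli]
        by_cases h0 : k % 16 = 0 <;> by_cases h15 : k % 16 = 15 <;> by_cases hl : k + 1 = L <;>
          simp [h0, h15, hl, List.append_assoc]
      rw [hstep]
      cases c' with
      | nil =>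
          have hcl : k % 16 = 15 ∨ k + 1 = L := by
            rcases hend with h | h
            · exact Or.inl (by simp only [List.length_cons, List.length_nil] at h; omega)
            · exact Or.inr (by simp only [List.length_cons, List.length_nil] at h; omega)
          rw [if_pos hcl]
          simp [PySem.List.enumerate_nil, List.append_assoc]
      | cons b2 c'' =>
          have hno : ¬ (k % 16 = 15 ∨ k + 1 = L) := by
            simp only [List.length_cons] at h16 hL
            rintro (h | h) <;> omega
          rw [if_neg hno]
          simp only [List.append_nil]
          have hk1 : ((k : Int) + 1) = ((k + 1 : Nat) : Int) := by push_cast; ring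
          rw [hk1, ih]
          · have hmod : (k + 1) % 16 ≠ 0 := by
              simp only [List.length_cons] at h16; omega
            rw [if_neg hmod]
            simp [List.append_assoc]
          · simp
          · simp only [List.length_cons] at h16 ⊢; omega
          · simp only [List.length_cons] at hL ⊢; omega
          · simp only [List.length_cons] at hend ⊢; omega

theorem pv_b_main (L : Nat) (data : List Int) (k : Nat) (acc : List (List Char))
    (hk : k % 16 = 0) (hL : k + data.length = L) :
    (PySem.List.enumerate data (k : Int)).foldl (pvStepB ((L : Int) - 1)) acc
      = acc ++ ((pvChunks data).map pvRowP).flatten := by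
  induction hn : data.length using Nat.strong_induction_on generalizing data k acc with
  | _ n ihn =>
  subst hn
  cases hdata : data with
  | nil => subst hdata; simp [pvChunks, PySem.List.enumerate_nil]
  | cons x xs =>
  rw [← hdata]
  have hne : data ≠ [] := by rw [hdata]; simp
  have hsplit : data = data.take 16 ++ data.drop 16 := (List.take_append_drop 16 data).symm
  have hten : (data.take 16).length = min 16 data.length := by simp
  rw [pvChunks, if_neg hne]
  conv_lhs => rw [hsplit]
  rw [PySem.List.enumerate_append, List.foldl_append]
  have hcne : data.take 16 ≠ [] := by
    intro h; have := congrArg List.length h; simp at this; rw [hdata] at this; simp at this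
  rw [pv_b_chunk L (data.take 16) k acc hcne (by omega) (by omega)
        (by by_cases h : 16 ≤ data.length
            · left; omega
            · right; omega)]
  rw [if_pos hk]
  have hk2 : ((k : Int) + ((data.take 16).length : Int)) = ((k + (data.take 16).length : Nat) : Int) := by
    push_cast; ring
  rw [hk2]
  by_cases hbig : 16 ≤ data.length
  · have hlt : (data.drop 16).length < data.length := by rw [List.length_drop]; omega
    have hk' : (k + (data.take 16).length) % 16 = 0 := by omega
    have hL' : (k + (data.take 16).length) + (data.drop 16).length = L := by
      rw [List.length_drop]; omega
    rw [ihn (data.drop 16).length hlt (data.drop 16) (k + (data.take 16).length)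
        (acc ++ [pvRowOpen] ++ List.map pvSpan (data.take 16) ++ [pvClose]) hk' hL' rfl]
    simp [pvRowP, List.append_assoc]
  · have hdrop : data.drop 16 = [] := by
      apply List.eq_nil_of_length_eq_zero; simp; omega
    rw [hdrop]
    simp [pvChunks, PySem.List.enumerate_nil, pvRowP, List.append_assoc]

theorem pv_flatten_rows (cs : List (List Int)) :
    ((cs.map pvRowP).flatten).flatten = (cs.map pvRowC).flatten := by
  induction cs with
  | nil => simp
  | cons c cs ih =>
      simp [pvRowP, pvRowC, ih, List.append_assoc]

theorem pv_b_closed (data : List Int) (title : String) :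
    render_byte_array_alt data title
      = String.mk (pvHeader title ++ ((pvChunks data).map pvRowC).flatten ++ pvClose) := by
  simp only [render_byte_array_alt]
  have hmain := pv_b_main data.length data 0 [pvHeader title] (by omega) (by omega)
  simp only [Nat.cast_zero] at hmain
  rw [hmain]
  simp [pv_flatten_rows, List.append_assoc]

-- ===== VERDICT (by name: the statement is the Claim_ definition above) =====
theorem render_byte_array_spec : Claim_equal_render_byte_array := by
  intro data title _
  unfold Spec_render_byte_array
  rw [pv_a_closed, pv_b_closed]
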